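-- pv_equiv track=rewrite | github.com/darkone23/langnet-cli | src/langnet/engine/sanskrit_normalizer.py | _velthuis_to_slp1_basic
-- ===== SOURCE A (Python) =====
-- def _velthuis_to_slp1_basic(text: str) -> str:
--     """Simple Velthuis to SLP1 mapper for fallback canonicalization."""
--     replacements = [
--         ("aa", "A"),
--         ("ii", "I"),
--         ("uu", "U"),
--         ("~n", "Y"),
--         (".rr", "F"),
--         (".r", "f"),
--         (".ll", "X"),
--         (".l", "x"),
--         (".n", "R"),
--         (".t", "w"),
--         (".d", "q"),
--         (".s", "z"),
--         ("'s", "S"),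
--     ]
--     out = text
--     for old, new in replacements:
--         out = out.replace(old, new)
--     return out
-- ===== SOURCE B (Python) =====
-- _TABLE = (
--     ("aa", "A"), ("ii", "I"), ("uu", "U"), ("~n", "Y"),
--     (".rr", "F"), (".r", "f"), (".ll", "X"), (".l", "x"),
--     (".n", "R"), (".t", "w"), (".d", "q"), (".s", "z"), ("'s", "S"),
-- )
--
-- def _velthuis_to_slp1_basic(text: str) -> str:
--     """Single left-to-right scan: at each index take the first table pattern
--     that matches (longest-first where patterns share a prefix), else copy the
--     character."""
--     out = []
--     i = 0
--     n = len(text)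
--     while i < n:
--         for old, new in _TABLE:
--             if text.startswith(old, i):
--                 out.append(new)
--                 i += len(old)
--                 break
--         else:
--             out.append(text[i])
--             i += 1
--     return "".join(out)
-- ===== Notes on version B (the rewrite author's own statement) =====
-- stated objective: idiomatic
-- what changed: Replaces the 13 sequential full-string str.replace passes with one left-to-right scan that tries the patterns (longest-first where they share a prefix) at each position and copies unmatched characters.
import Mathlib
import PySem

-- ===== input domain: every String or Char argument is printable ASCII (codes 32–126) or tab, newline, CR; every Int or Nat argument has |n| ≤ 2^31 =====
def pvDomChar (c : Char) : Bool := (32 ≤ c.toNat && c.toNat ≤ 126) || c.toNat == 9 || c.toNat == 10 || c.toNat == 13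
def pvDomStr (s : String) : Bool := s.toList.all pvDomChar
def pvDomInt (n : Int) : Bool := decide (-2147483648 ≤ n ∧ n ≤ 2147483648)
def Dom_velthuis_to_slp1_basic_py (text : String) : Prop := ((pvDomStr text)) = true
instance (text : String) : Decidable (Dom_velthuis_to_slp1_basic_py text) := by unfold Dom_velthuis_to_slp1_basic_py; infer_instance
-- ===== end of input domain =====

-- B replaces A's 13 sequential full-string replace passes by ONE left-to-right scan with a
-- first-match (longest-first within a shared prefix) pattern table; same return value, proved below.

-- ===== PORT A =====
def pvReplacements : List (String × String) :=
  [("aa", "A"), ("ii", "I"), ("uu", "U"), ("~n", "Y"),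
   (".rr", "F"), (".r", "f"), (".ll", "X"), (".l", "x"),
   (".n", "R"), (".t", "w"), (".d", "q"), (".s", "z"), ("'s", "S")]

def velthuis_to_slp1_basic_py (text : String) : String :=
  pvReplacements.foldl (fun out p => PySem.Str.replace out p.1 p.2) text

-- ===== PORT B =====
def pvTable : List (List Char × List Char) :=
  [(['a','a'], ['A']), (['i','i'], ['I']), (['u','u'], ['U']), (['~','n'], ['Y']),
   (['.','r','r'], ['F']), (['.','r'], ['f']), (['.','l','l'], ['X']), (['.','l'], ['x']),
   (['.','n'], ['R']), (['.','t'], ['w']), (['.','d'], ['q']), (['.','s'], ['z']),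
   (['\'','s'], ['S'])]

-- first table pattern matching at the current position (the inner `for … break`)
def pvFindMatch (l : List Char) : List (List Char × List Char) → Option (List Char × List Char)
  | [] => none
  | p :: ps => if p.1.isPrefixOf l then some p else pvFindMatch l ps

-- the while-loop scan: replace a match and jump over it, else copy one character
def pvScan (ps : List (List Char × List Char)) : List Char → List Char
  | [] => []
  | c :: t =>
    match pvFindMatch (c :: t) ps with
    | some (o, n) => n ++ pvScan ps (t.drop (o.length - 1))
    | none => c :: pvScan ps t
termination_by l => l.length
decreasing_by
  · simp only [List.length_drop, List.length_cons]; omega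
  · simp

def velthuis_to_slp1_basic_py_alt (text : String) : String :=
  String.ofList (pvScan pvTable text.toList)

-- ===== PRECONDITION & SPEC =====
def Spec_velthuis_to_slp1_basic_py (text : String) (out : String) : Prop := out = velthuis_to_slp1_basic_py_alt text
instance (text : String) (out : String) : Decidable (Spec_velthuis_to_slp1_basic_py text out) := by unfold Spec_velthuis_to_slp1_basic_py; infer_instance

-- ===== CLAIM (what is proved, stated in full; the proofs are below) =====
def Claim_equal_velthuis_to_slp1_basic_py : Prop := ∀ (text : String), Dom_velthuis_to_slp1_basic_py text → Spec_velthuis_to_slp1_basic_py text (velthuis_to_slp1_basic_py text)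

-- ===== LEMMAS AND PROOFS =====

-- Recursive characterization of one (nonempty-pattern) Python str.replace pass.
def pvRep (o n : List Char) : List Char → List Char
  | [] => []
  | c :: t => if o.isPrefixOf (c :: t) then n ++ pvRep o n (t.drop (o.length - 1)) else c :: pvRep o n t
termination_by l => l.length
decreasing_by
  · simp only [List.length_drop, List.length_cons]; omega
  · simp

lemma pvRep_go (o n : List Char) (ho : o ≠ []) :
    ∀ fuel (l acc : List Char), l.length ≤ fuel →
      PySem.Chars.replace.go o n fuel l acc = acc.reverse ++ pvRep o n l := by
  intro fuel
  induction fuel with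
  | zero =>
      intro l acc h
      obtain rfl : l = [] := by cases l with
        | nil => rfl
        | cons c t => simp at h
      rw [pvRep]
      simp [PySem.Chars.replace.go]
  | succ f ih =>
      intro l acc h
      cases l with
      | nil => rw [pvRep]; simp [PySem.Chars.replace.go]
      | cons c t =>
          rw [PySem.Chars.replace.go, pvRep]
          by_cases hp : o.isPrefixOf (c :: t) = true
          · rw [if_pos hp, if_pos hp]
            cases o with
            | nil => exact absurd rfl ho
            | cons z os =>
                have hlen : (t.drop os.length).length ≤ f := by
                  simp only [List.length_drop]
                  simp only [List.length_cons] at h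
                  omega
                rw [show (c :: t).drop (z :: os).length = t.drop os.length by simp,
                    ih (t.drop os.length) _ hlen]
                simp
          · rw [if_neg hp, if_neg hp, ih t _ (by simp only [List.length_cons] at h; omega)]
            simp

lemma pvRep_eq (l o n : List Char) (ho : o ≠ []) :
    PySem.Chars.replace l o n = pvRep o n l := by
  unfold PySem.Chars.replace
  rw [if_neg (by simpa using ho)]
  simpa using pvRep_go o n ho l.length l [] le_rfl

lemma pvFindMatch_eq_none {l : List Char} {ps : List (List Char × List Char)}
    (h : ∀ p ∈ ps, ¬ p.1.isPrefixOf l = true) : pvFindMatch l ps = none := by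
  induction ps with
  | nil => rfl
  | cons p ps ih =>
      simp only [pvFindMatch]
      rw [if_neg (by simpa using h p (by simp))]
      exact ih (fun q hq => h q (by simp [hq]))

lemma pvFindMatch_mem {l : List Char} {ps : List (List Char × List Char)}
    {p : List Char × List Char} (h : pvFindMatch l ps = some p) :
    p ∈ ps ∧ p.1.isPrefixOf l = true := by
  induction ps with
  | nil => simp [pvFindMatch] at h
  | cons q ps ih =>
      simp only [pvFindMatch] at h
      by_cases hq : q.1.isPrefixOf l = true
      · rw [if_pos hq] at h
        obtain rfl : q = p := by simpa using h
        exact ⟨by simp, hq⟩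
      · rw [if_neg hq] at h
        obtain ⟨h1, h2⟩ := ih h
        exact ⟨by simp [h1], h2⟩

lemma pvFindMatch_append (l : List Char) (ps qs : List (List Char × List Char)) :
    pvFindMatch l (ps ++ qs) = (pvFindMatch l ps).or (pvFindMatch l qs) := by
  induction ps with
  | nil => simp [pvFindMatch]
  | cons p ps ih =>
      simp only [List.cons_append, pvFindMatch]
      by_cases hp : p.1.isPrefixOf l = true
      · simp [hp]
      · simp [hp, ih]

lemma pvHeadI_of_isPrefixOf {o : List Char} {x : Char} {u : List Char}
    (ho : o ≠ []) (h : o.isPrefixOf (x :: u) = true) : o.headI = x := by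
  rw [List.isPrefixOf_iff_prefix] at h
  cases o with
  | nil => exact absurd rfl ho
  | cons z os =>
      obtain ⟨r, hr⟩ := h
      simp only [List.cons_append] at hr
      simp [← (List.cons.injEq ..).mp hr |>.1]

lemma pvScan_nil_pats : ∀ l, pvScan [] l = l := by
  intro l
  induction l with
  | nil => rw [pvScan]
  | cons c t ih => rw [pvScan]; simpa [pvFindMatch] using ih

-- scanning walks through a stretch whose characters trigger no pattern
lemma pvScan_prefix_skip (ps : List (List Char × List Char))
    (hps : ∀ p ∈ ps, p.1 ≠ []) :
    ∀ (s r : List Char), (∀ p ∈ ps, p.1.headI ∉ s) →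
      pvScan ps (s ++ r) = s ++ pvScan ps r := by
  intro s
  induction s with
  | nil => intro r _; simp
  | cons x s' ih =>
      intro r hs
      have hfind : pvFindMatch (x :: (s' ++ r)) ps = none := by
        refine pvFindMatch_eq_none (fun p hp hpre => ?_)
        exact hs p hp (by simp [pvHeadI_of_isPrefixOf (hps p hp) hpre])
      rw [List.cons_append, pvScan, hfind, ih r (fun p hp => fun hmem => hs p hp (by simp [hmem]))]
      simp

-- a prefix of the scan output made of never-output, never-trigger characters came from the input
lemma pvScan_prefix_reflect (ps : List (List Char × List Char))
    (hps : ∀ p ∈ ps, p.1 ≠ [] ∧ p.2 ≠ []) :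
    ∀ N (t s : List Char), t.length ≤ N →
      (∀ p ∈ ps, p.1.headI ∉ s ∧ ∀ y ∈ p.2, y ∉ s) →
      s <+: pvScan ps t → s <+: t := by
  intro N
  induction N with
  | zero =>
      intro t s ht _ hpre
      obtain rfl : t = [] := by cases t with
        | nil => rfl
        | cons c t' => simp at ht
      rw [pvScan] at hpre
      simpa [List.prefix_nil] using hpre
  | succ N ih =>
      intro t s ht hs hpre
      cases t with
      | nil =>
          rw [pvScan] at hpre
          simpa [List.prefix_nil] using hpre
      | cons c t' =>
          cases s with
          | nil => exact List.nil_prefix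
          | cons x s' =>
              rw [pvScan] at hpre
              cases hfind : pvFindMatch (c :: t') ps with
              | some p =>
                  exfalso
                  obtain ⟨o, nn⟩ := p
                  rw [hfind] at hpre
                  obtain ⟨hmem, -⟩ := pvFindMatch_mem hfind
                  cases hnn : nn with
                  | nil => exact (hps _ hmem).2 hnn
                  | cons y nn' =>
                      subst hnn
                      obtain ⟨r, hr⟩ := hpre
                      simp only [List.cons_append] at hr
                      have hyx : y = x := ((List.cons.injEq ..).mp hr.symm).1
                      exact (hs _ hmem).2 y (by simp) (by simp [hyx])
              | none =>
                  rw [hfind] at hpre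
                  obtain ⟨r, hr⟩ := hpre
                  simp only [List.cons_append, List.cons.injEq] at hr
                  obtain ⟨rfl, hr⟩ := hr
                  have hs' : ∀ p ∈ ps, p.1.headI ∉ s' ∧ ∀ y ∈ p.2, y ∉ s' := by
                    intro p hp
                    exact ⟨fun hm => (hs p hp).1 (by simp [hm]),
                           fun y hy hm => (hs p hp).2 y hy (by simp [hm])⟩
                  have : s' <+: t' :=
                    ih t' s' (by simp only [List.length_cons] at ht; omega) hs' ⟨r, hr⟩
                  exact List.cons_prefix_cons.mpr ⟨rfl, this⟩

lemma pvRep_append (o n : List Char) (ho : o ≠ []) :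
    ∀ (u X : List Char), (∀ y ∈ u, y ≠ o.headI) →
      pvRep o n (u ++ X) = u ++ pvRep o n X := by
  intro u
  induction u with
  | nil => intro X _; simp
  | cons y u' ih =>
      intro X hu
      have hnp : ¬ o.isPrefixOf (y :: (u' ++ X)) = true := fun hp =>
        hu y (by simp) (pvHeadI_of_isPrefixOf ho hp).symm
      rw [List.cons_append, pvRep, if_neg hnp, ih X (fun z hz => hu z (by simp [hz]))]
      simp

-- MAIN: one more replace pass over the scan of the earlier patterns = scan with the pattern appended
lemma pvRep_scan (o n : List Char) (ho : o ≠ []) (qs : List (List Char × List Char))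
    (hq : ∀ p ∈ qs, p.1 ≠ [] ∧ p.2 ≠ [])
    (hrel : ∀ p ∈ qs, (∀ y ∈ p.2, y ∉ o) ∧ p.1.headI ∉ o.tail) :
    ∀ N t, t.length ≤ N →
      pvRep o n (pvScan qs t) = pvScan (qs ++ [(o, n)]) t := by
  intro N
  induction N with
  | zero =>
      intro t ht
      obtain rfl : t = [] := by cases t with
        | nil => rfl
        | cons c t' => simp at ht
      rw [pvScan, pvScan, pvRep]
  | succ N ih =>
      intro t ht
      cases t with
      | nil => rw [pvScan, pvScan, pvRep]
      | cons c t' =>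
          have hlt : t'.length ≤ N := by simp only [List.length_cons] at ht; omega
          rw [pvScan, pvScan, pvFindMatch_append]
          cases hfind : pvFindMatch (c :: t') qs with
          | some p =>
              obtain ⟨oj, nj⟩ := p
              obtain ⟨hmem, -⟩ := pvFindMatch_mem hfind
              simp only [Option.some_or]
              have hdrop : (t'.drop (oj.length - 1)).length ≤ N := by
                simp only [List.length_drop]; omega
              rw [pvRep_append o n ho nj _
                    (fun y hy => fun hcontra =>
                      (hrel _ hmem).1 y hy (hcontra ▸ (by cases o with | nil => exact absurd rfl ho | cons a b => simp))),
                  ih _ hdrop]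
          | none =>
              
              by_cases hpre : o.isPrefixOf (c :: t') = true
              · -- the new pattern fires here
                rw [pvFindMatch, if_pos hpre]
                simp only [Option.none_or]
                cases o with
                | nil => exact absurd rfl ho
                | cons z os =>
                    have hz : z = c := by
                      have := pvHeadI_of_isPrefixOf (o := z :: os) (by simp) hpre
                      simpa using this
                    subst hz
                    obtain ⟨r, hr⟩ : os <+: t' := by
                      rw [List.isPrefixOf_iff_prefix] at hpre
                      exact (List.cons_prefix_cons.mp hpre).2
                    have hskip : pvScan qs t' = os ++ pvScan qs r := by
                      rw [← hr]
                      exact pvScan_prefix_skip qs (fun p hp => (hq p hp).1) os r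
                        (fun p hp => by simpa using (hrel p hp).2)
                    rw [hskip, pvRep, if_pos ?_]
                    · have hdropos : (os ++ pvScan qs r).drop ((z :: os).length - 1)
                          = pvScan qs r := by
                        simp
                      rw [hdropos]
                      have hrlen : r.length ≤ N := by
                        have : os.length + r.length = t'.length := by
                          rw [← hr]; simp
                        omega
                      rw [ih r hrlen]
                      have : t'.drop ((z :: os).length - 1) = r := by
                        rw [← hr]; simp
                      rw [this]
                    · rw [List.isPrefixOf_iff_prefix]
                      exact List.cons_prefix_cons.mpr ⟨rfl, by exact ⟨pvScan qs r, by simp⟩⟩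
              · -- no pattern fires here
                rw [pvFindMatch, if_neg hpre, pvFindMatch]
                simp only [Option.none_or]
                have hnp : ¬ o.isPrefixOf (c :: pvScan qs t') = true := by
                  intro hcon
                  apply hpre
                  cases o with
                  | nil => exact absurd rfl ho
                  | cons z os =>
                      have hz : z = c := by
                        have := pvHeadI_of_isPrefixOf (o := z :: os) (by simp) hcon
                        simpa using this
                      subst hz
                      have hos : os <+: pvScan qs t' := by
                        rw [List.isPrefixOf_iff_prefix] at hcon
                        exact (List.cons_prefix_cons.mp hcon).2
                      have : os <+: t' :=
                        pvScan_prefix_reflect qs hq t'.length t' os le_rfl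
                          (fun p hp => ⟨by simpa using (hrel p hp).2,
                            fun y hy hm => (hrel p hp).1 y hy (by simp [hm])⟩) hos
                      rw [List.isPrefixOf_iff_prefix]
                      exact List.cons_prefix_cons.mpr ⟨rfl, this⟩
                rw [pvRep, if_neg hnp, ih t' hlt]

-- validity of a pattern table: nonempty patterns/outputs, outputs never contain characters of a
-- later pattern, and no pattern's first character occurs past the first position of a later pattern
def pvGoodB : List (List Char × List Char) → Bool
  | [] => true
  | p :: ps =>
      (!p.1.isEmpty && !p.2.isEmpty &&
        ps.all (fun q => p.2.all (fun y => !q.1.contains y) && !q.1.tail.contains p.1.headI)) &&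
      pvGoodB ps

lemma pvGoodB_append : ∀ (qs : List (List Char × List Char)) (p : List Char × List Char),
    pvGoodB (qs ++ [p]) = true →
      pvGoodB qs = true ∧ (p.1 ≠ [] ∧ p.2 ≠ []) ∧
      (∀ q ∈ qs, (∀ y ∈ q.2, y ∉ p.1) ∧ q.1.headI ∉ p.1.tail) := by
  intro qs p
  induction qs with
  | nil =>
      intro h
      simp only [List.nil_append, pvGoodB, Bool.and_eq_true, Bool.not_eq_eq_eq_not,
        Bool.not_true, List.isEmpty_eq_false_iff] at h
      exact ⟨rfl, ⟨h.1.1.1, h.1.1.2⟩, by simp⟩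
  | cons q qs ih =>
      intro h
      simp only [List.cons_append, pvGoodB, Bool.and_eq_true] at h
      obtain ⟨⟨hne, hall⟩, hrest⟩ := h
      obtain ⟨hqs, hp, hqsrel⟩ := ih hrest
      rw [List.all_eq_true] at hall
      have hqp := hall p (by simp)
      simp only [Bool.and_eq_true, List.all_eq_true, Bool.not_eq_eq_eq_not, Bool.not_true,
        List.contains_eq_mem, decide_eq_false_iff_not] at hqp
      refine ⟨?_, hp, ?_⟩
      · simp only [pvGoodB, Bool.and_eq_true]
        refine ⟨⟨hne, ?_⟩, hqs⟩
        rw [List.all_eq_true]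
        intro x hx
        exact hall x (by simp [hx])
      · intro q' hq'
        rcases List.mem_cons.mp hq' with rfl | hmem
        · exact ⟨fun y hy => hqp.1 y hy, hqp.2⟩
        · exact hqsrel q' hmem

lemma pvGoodB_nonempty : ∀ ps, pvGoodB ps = true → ∀ p ∈ ps, p.1 ≠ [] ∧ p.2 ≠ [] := by
  intro ps
  induction ps with
  | nil => simp
  | cons q qs ih =>
      intro h p hp
      simp only [pvGoodB, Bool.and_eq_true, Bool.not_eq_eq_eq_not, Bool.not_true,
        List.isEmpty_eq_false_iff] at h
      rcases List.mem_cons.mp hp with rfl | hmem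
      · exact ⟨h.1.1.1, h.1.1.2⟩
      · exact ih h.2 p hmem

lemma pvChain_eq_scan : ∀ ps, pvGoodB ps = true →
    ∀ l, ps.foldl (fun acc p => pvRep p.1 p.2 acc) l = pvScan ps l := by
  intro ps
  induction ps using List.reverseRecOn with
  | nil => intro _ l; simpa using (pvScan_nil_pats l).symm
  | append_singleton qs p ihq =>
      intro hgood l
      obtain ⟨hqs, hp, hrel⟩ := pvGoodB_append qs p hgood
      rw [List.foldl_append, List.foldl_cons, List.foldl_nil, ihq hqs l]
      exact pvRep_scan p.1 p.2 hp.1 qs (pvGoodB_nonempty qs hqs) hrel l.length l le_rfl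

lemma pvStrChain (ps : List (String × String)) :
    ∀ s : String,
      (ps.foldl (fun out p => PySem.Str.replace out p.1 p.2) s).toList
      = ps.foldl (fun l (p : String × String) => PySem.Chars.replace l p.1.toList p.2.toList) s.toList := by
  induction ps with
  | nil => intro s; simp
  | cons p ps ih =>
      intro s
      rw [List.foldl_cons, List.foldl_cons, ih, PySem.Str.toList_replace]

lemma pvCharsChain_eq_repChain : ∀ (ps : List (List Char × List Char)),
    (∀ p ∈ ps, p.1 ≠ []) → ∀ l,
      ps.foldl (fun acc p => PySem.Chars.replace acc p.1 p.2) l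
      = ps.foldl (fun acc p => pvRep p.1 p.2 acc) l := by
  intro ps
  induction ps with
  | nil => intro _ l; rfl
  | cons p ps ih =>
      intro hne l
      rw [List.foldl_cons, List.foldl_cons,
          pvRep_eq l p.1 p.2 ((hne p (by simp))),
          ih (fun q hq => hne q (by simp [hq]))]

-- ===== VERDICT (by name: the statement is the Claim_ definition above) =====
theorem velthuis_to_slp1_basic_py_spec : Claim_equal_velthuis_to_slp1_basic_py := by
  intro text _
  unfold Spec_velthuis_to_slp1_basic_py
  apply String.toList_inj.mp
  have hmap : pvReplacements.map (fun p => (p.1.toList, p.2.toList)) = pvTable := by decide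
  rw [velthuis_to_slp1_basic_py, pvStrChain pvReplacements text]
  rw [show pvReplacements.foldl
        (fun l (p : String × String) => PySem.Chars.replace l p.1.toList p.2.toList) text.toList
      = pvTable.foldl (fun l p => PySem.Chars.replace l p.1 p.2) text.toList by
        rw [← hmap, List.foldl_map]]
  rw [pvCharsChain_eq_repChain pvTable (by decide) text.toList,
      pvChain_eq_scan pvTable (by decide) text.toList]
  simp [velthuis_to_slp1_basic_py_alt]
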